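-- pv_equiv track=rewrite | github.com/jinlibao/toolkits | Project.Euler/Answers.Python/34.py | digitsFactorials
-- ===== SOURCE A (Python) =====
-- def extractDigits(number):
-- 	string = str(number)
-- 	digits = []
-- 	for i in string:
-- 		digits.append(int(i))
-- 	return digits
--
-- def factorialSeries():
-- 	fSeries = []
-- 	for i in range(10):
-- 		if i == 0:
-- 			fSeries.append(1)
-- 		else:
-- 			value = fSeries[i-1] * i
-- 			fSeries.append(value)
-- 	return fSeries
--
-- def sumFactorialDigits(digits, fSeries):
-- 	number = 0
-- 	for d in digits:
-- 		number += fSeries[d]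
-- 		#number += factorial(d)
-- 	return number
--
-- def isSpecial(number, fSeries):
-- 	if number <= 2:
-- 		return False
-- 	digits = extractDigits(number)
-- 	sumOfDigits = sumFactorialDigits(digits, fSeries)
-- 	if sumOfDigits == number:
-- 		return True
-- 	else:
-- 		return False
--
-- def digitsFactorials(UPPER_BOUND):
-- 	i = 2
-- 	fSeries = factorialSeries()
-- 	specialNumbers = []
-- 	while i < UPPER_BOUND:
-- 		if isSpecial(i, fSeries):
-- 			specialNumbers.append(i)
-- 		i += 1
-- 	return (sum(specialNumbers), specialNumbers)
-- ===== SOURCE B (Python) =====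
-- def digitsFactorials(UPPER_BOUND):
--     # No number with 8+ digits can equal its digit-factorial sum (8*9! = 2903040 < 10**7),
--     # and for 7 digits the sum is at most 7*9! = 2540160, so cap the scan there.
--     FACT = (1, 1, 2, 6, 24, 120, 720, 5040, 40320, 362880)
--     limit = min(UPPER_BOUND, 2540161)
--     specialNumbers = []
--     for n in range(3, limit):
--         s, m = 0, n
--         while m > 0:
--             s += FACT[m % 10]
--             m //= 10
--         if s == n:
--             specialNumbers.append(n)
--     return (sum(specialNumbers), specialNumbers)
-- ===== Notes on version B (the rewrite author's own statement) =====
-- stated objective: faster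
-- what changed: B caps the scan at 2540161 (no 8+-digit number can equal its digit-factorial sum and 7 digits give at most 7*9! = 2540160) and computes each digit-factorial sum arithmetically with % and // against a precomputed tuple instead of building a factorial series and converting each number to a string digit list.
import Mathlib
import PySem

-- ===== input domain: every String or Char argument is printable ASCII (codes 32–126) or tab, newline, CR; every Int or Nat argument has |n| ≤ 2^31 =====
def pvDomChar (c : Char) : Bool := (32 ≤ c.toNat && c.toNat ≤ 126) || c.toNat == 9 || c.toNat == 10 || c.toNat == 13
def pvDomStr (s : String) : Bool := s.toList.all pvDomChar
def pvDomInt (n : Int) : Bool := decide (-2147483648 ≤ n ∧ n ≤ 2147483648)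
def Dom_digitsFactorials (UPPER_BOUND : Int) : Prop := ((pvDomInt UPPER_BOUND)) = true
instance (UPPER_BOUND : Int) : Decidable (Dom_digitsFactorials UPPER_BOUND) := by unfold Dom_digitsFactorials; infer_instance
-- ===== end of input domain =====

-- B caps the scan at 2540161 (no number with 8+ digits can equal its digit-factorial sum, and
-- 7-digit sums are at most 7*9! = 2540160) and computes digit-factorial sums arithmetically
-- (% / //) from a literal table instead of via str() digit extraction: asymptotically faster.


-- ===== PORT A =====
-- for i in str(number): digits.append(int(i)) — iterating a Python str yields its characters;
-- int(i) is PySem.Int.ofChars? [c]; .getD 0 is exact here since every character of str(number)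
-- for number ≥ 2 (the only numbers A passes in) is a decimal digit.
def extractDigits (number : Int) : List Int :=
  (PySem.Int.toChars number).foldl
    (fun digits c => digits ++ [(PySem.Int.ofChars? [c]).getD 0]) []

def factorialSeries : List Int :=
  (PySem.List.pyRange 0 10 1).foldl
    (fun fSeries i =>
      if i == 0 then fSeries ++ [1]
      else fSeries ++ [PySem.List.pyGetD fSeries (i - 1) 0 * i]) []

def sumFactorialDigits (digits fSeries : List Int) : Int :=
  digits.foldl (fun number d => number + PySem.List.pyGetD fSeries d 0) 0

def isSpecial (number : Int) (fSeries : List Int) : Bool :=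
  if number ≤ 2 then false
  else if sumFactorialDigits (extractDigits number) fSeries == number then true else false

def digitsFactorialsLoop (UPPER_BOUND : Int) (fSeries : List Int) (i : Int)
    (specialNumbers : List Int) : List Int :=
  if _h : i < UPPER_BOUND then
    digitsFactorialsLoop UPPER_BOUND fSeries (i + 1)
      (if isSpecial i fSeries then specialNumbers ++ [i] else specialNumbers)
  else specialNumbers
termination_by (UPPER_BOUND - i).toNat
decreasing_by omega

def digitsFactorials (UPPER_BOUND : Int) : Int × List Int :=
  let fSeries := factorialSeries
  let specialNumbers := digitsFactorialsLoop UPPER_BOUND fSeries 2 []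
  (specialNumbers.sum, specialNumbers)

-- ===== PORT B =====
def pvFACT : List Int := [1, 1, 2, 6, 24, 120, 720, 5040, 40320, 362880]

-- while m > 0: s += FACT[m % 10]; m //= 10
def digitFactSum (s m : Int) : Int :=
  if _h : 0 < m then
    digitFactSum (s + PySem.List.pyGetD pvFACT (PySem.Int.mod m 10) 0) (PySem.Int.floordiv m 10)
  else s
termination_by m.toNat
decreasing_by
  rw [PySem.Int.floordiv_eq_ediv_of_pos (by omega : (0:Int) < 10)]; omega

def digitsFactorials_alt (UPPER_BOUND : Int) : Int × List Int :=
  let limit := min UPPER_BOUND 2540161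
  let specialNumbers :=
    (PySem.List.pyRange 3 limit 1).foldl
      (fun acc n => if digitFactSum 0 n == n then acc ++ [n] else acc) []
  (specialNumbers.sum, specialNumbers)

-- ===== PRECONDITION & SPEC =====
def Spec_digitsFactorials (UPPER_BOUND : Int) (out : Int × List Int) : Prop := out = digitsFactorials_alt UPPER_BOUND
instance (UPPER_BOUND : Int) (out : Int × List Int) : Decidable (Spec_digitsFactorials UPPER_BOUND out) := by unfold Spec_digitsFactorials; infer_instance

-- ===== CLAIM (what is proved, stated in full; the proofs are below) =====
def Claim_equal_digitsFactorials : Prop := ∀ (UPPER_BOUND : Int), Dom_digitsFactorials UPPER_BOUND → Spec_digitsFactorials UPPER_BOUND (digitsFactorials UPPER_BOUND)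

-- ===== LEMMAS AND PROOFS =====

theorem factorialSeries_eq : factorialSeries = pvFACT := by decide

-- clean recursive description of Nat.toDigits 10
def tdr (m : Nat) : List Char :=
  if h : m < 10 then [Nat.digitChar m]
  else tdr (m / 10) ++ [Nat.digitChar (m % 10)]
termination_by m
decreasing_by omega

theorem toDigitsCore_eq_tdr : ∀ (f n : Nat) (acc : List Char), n < f →
    Nat.toDigitsCore 10 f n acc = tdr n ++ acc := by
  intro f
  induction f with
  | zero => omega
  | succ f ih =>
    intro n acc h
    rw [Nat.toDigitsCore]
    by_cases h10 : n / 10 = 0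
    · have hn : n < 10 := by omega
      have : n % 10 = n := Nat.mod_eq_of_lt hn
      simp [h10, tdr, hn, this]
    · have hn : ¬ n < 10 := by omega
      rw [if_neg h10, ih (n / 10) _ (by omega)]
      conv_rhs => rw [tdr]
      rw [dif_neg hn, List.append_assoc]
      rfl

theorem toDigits_eq_tdr (n : Nat) : Nat.toDigits 10 n = tdr n := by
  rw [Nat.toDigits, toDigitsCore_eq_tdr (n + 1) n [] (by omega), List.append_nil]

-- the digit-factorial lookup used by both sides
def pvF (d : Int) : Int := PySem.List.pyGetD pvFACT d 0

theorem pvF_le (d : Int) : pvF d ≤ 362880 := by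
  by_cases h : PySem.Raise.InRange pvFACT.length d
  · have hmem := PySem.List.pyGetD_mem pvFACT (i := d) 0 h
    simp only [pvF, pvFACT, List.mem_cons, List.not_mem_nil, or_false] at hmem ⊢
    rcases hmem with h|h|h|h|h|h|h|h|h|h <;> omega
  · unfold pvF
    rw [PySem.List.pyGetD_of_none pvFACT d 0 ((PySem.List.pyGet?_eq_none_iff pvFACT d).mpr h)]
    norm_num

-- reference digit-factorial sum
def dfsN (m : Nat) : Int :=
  if m = 0 then 0 else dfsN (m / 10) + pvF ((m % 10 : Nat) : Int)
termination_by m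
decreasing_by omega

theorem digit_char_int (d : Nat) (h : d < 10) :
    (PySem.Int.ofChars? [Nat.digitChar d]).getD 0 = (d : Int) := by
  interval_cases d <;> decide

theorem tdr_sum (m : Nat) (hm : 0 < m) :
    ((tdr m).map (fun c => pvF ((PySem.Int.ofChars? [c]).getD 0))).sum = dfsN m := by
  induction m using Nat.strong_induction_on with
  | _ m ih =>
    by_cases h : m < 10
    · rw [tdr, dif_pos h]
      rw [List.map_cons, List.map_nil, List.sum_cons, List.sum_nil, add_zero,
        digit_char_int m h]
      have h0 : m / 10 = 0 := by omega
      have h1 : m % 10 = m := Nat.mod_eq_of_lt h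
      rw [dfsN, if_neg (by omega), h0, h1]
      rw [dfsN, if_pos rfl, zero_add]
    · rw [tdr, dif_neg h, List.map_append, List.sum_append,
        ih (m / 10) (by omega) (by omega)]
      rw [List.map_cons, List.map_nil, List.sum_cons, List.sum_nil, add_zero,
        digit_char_int (m % 10) (by omega)]
      have hm0 : ¬ m = 0 := by omega
      conv_rhs => rw [dfsN, if_neg hm0]

theorem extract_sum (m : Nat) (hm : 0 < m) :
    sumFactorialDigits (extractDigits (m : Int)) pvFACT = dfsN m := by
  have htc : PySem.Int.toChars (m : Int) = tdr m := by
    rw [PySem.Int.toChars]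
    rw [if_neg (by omega)]
    have : ((m : Int)).toNat = m := by omega
    rw [this, toDigits_eq_tdr]
  rw [extractDigits, htc, PySem.List.foldl_append_singleton_eq_map, List.nil_append]
  rw [sumFactorialDigits, PySem.List.foldl_add, List.map_map, zero_add]
  rw [← tdr_sum m hm]
  rfl

theorem digitFactSum_eq (m : Nat) : ∀ s : Int, digitFactSum s (m : Int) = s + dfsN m := by
  induction m using Nat.strong_induction_on with
  | _ m ih =>
    intro s
    by_cases h : m = 0
    · subst h
      rw [digitFactSum, dif_neg (by omega), dfsN, if_pos rfl, add_zero]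
    · rw [digitFactSum, dif_pos (by omega)]
      have h10 : PySem.Int.mod (m : Int) 10 = ((m % 10 : Nat) : Int) := by
        exact_mod_cast PySem.Int.mod_natCast m 10
      have hdiv : PySem.Int.floordiv (m : Int) 10 = ((m / 10 : Nat) : Int) := by
        exact_mod_cast PySem.Int.floordiv_natCast m 10
      rw [h10, hdiv, ih (m / 10) (by omega)]
      conv_rhs => rw [dfsN, if_neg h]
      show s + pvF ((m % 10 : Nat) : Int) + dfsN (m / 10) =
        s + (dfsN (m / 10) + pvF ((m % 10 : Nat) : Int))
      ring

theorem dfsN_le (k : Nat) : ∀ m : Nat, m < 10 ^ k → dfsN m ≤ 362880 * k := by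
  induction k with
  | zero =>
    intro m hm
    have : m = 0 := by omega
    subst this
    rw [dfsN]
    simp
  | succ k ih =>
    intro m hm
    by_cases h : m = 0
    · subst h; rw [dfsN]; simp; positivity
    · rw [dfsN, if_neg h]
      have h1 : m / 10 < 10 ^ k := by
        have : 10 ^ (k + 1) = 10 ^ k * 10 := by ring
        omega
      have h2 := ih (m / 10) h1
      have h3 := pvF_le ((m % 10 : Nat) : Int)
      omega

theorem dfsN_lt_big : ∀ m : Nat, 10 ^ 7 ≤ m → dfsN m < (m : Int) := by
  intro m
  induction m using Nat.strong_induction_on with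
  | _ m ih =>
    intro hm
    by_cases h : 10 ^ 7 ≤ m / 10
    · rw [dfsN, if_neg (by omega)]
      have h3 := pvF_le ((m % 10 : Nat) : Int)
      have h1 := ih (m / 10) (by omega) h
      omega
    · have h1 : m < 10 ^ 8 := by
        have : (10:Nat) ^ 8 = 10 ^ 7 * 10 := by norm_num
        omega
      have h2 := dfsN_le 8 m h1
      omega

theorem dfsN_lt (m : Nat) (hm : 2540161 ≤ m) : dfsN m < (m : Int) := by
  by_cases h : m < 10 ^ 7
  · have h2 := dfsN_le 7 m h
    omega
  · exact dfsN_lt_big m (by omega)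

-- the two membership predicates agree for n ≥ 3
theorem pred_eq (n : Int) (hn : 3 ≤ n) :
    isSpecial n factorialSeries = (digitFactSum 0 n == n) := by
  obtain ⟨m, rfl⟩ : ∃ m : Nat, n = (m : Int) := ⟨n.toNat, by omega⟩
  rw [isSpecial, if_neg (by omega), factorialSeries_eq]
  rw [extract_sum m (by omega), digitFactSum_eq m 0, zero_add]
  by_cases h : dfsN m = (m : Int) <;> simp [h]

-- no special numbers at or above the cap
theorem pred_false_big (n : Int) (hn : 2540161 ≤ n) :
    (digitFactSum 0 n == n) = false := by
  obtain ⟨m, rfl⟩ : ∃ m : Nat, n = (m : Int) := ⟨n.toNat, by omega⟩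
  rw [digitFactSum_eq m 0, zero_add]
  have := dfsN_lt m (by omega)
  simp only [beq_eq_false_iff_ne, ne_eq]
  omega

theorem loopA_eq (fS : List Int) (U : Int) : ∀ (i : Int) (acc : List Int),
    digitsFactorialsLoop U fS i acc =
      acc ++ (PySem.List.pyRange i U 1).filter (fun n => isSpecial n fS) := by
  intro i
  generalize hk : (U - i).toNat = k
  induction k generalizing i with
  | zero =>
    intro acc
    rw [digitsFactorialsLoop, dif_neg (by omega), PySem.List.pyRange_one_eq_nil (by omega)]
    simp
  | succ k ih =>
    intro acc
    have hlt : i < U := by omega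
    rw [digitsFactorialsLoop, dif_pos hlt, ih (i + 1) (by omega),
      PySem.List.pyRange_one_cons hlt, List.filter_cons]
    by_cases hs : isSpecial i fS <;> simp [hs]

theorem lists_eq (U : Int) :
    digitsFactorialsLoop U factorialSeries 2 [] =
      (PySem.List.pyRange 3 (min U 2540161) 1).foldl
        (fun acc n => if digitFactSum 0 n == n then acc ++ [n] else acc) [] := by
  rw [loopA_eq]
  conv_rhs => rw [PySem.List.foldl_append_if (fun n => digitFactSum 0 n == n) (fun n : Int => n)]
  simp only [List.nil_append, List.map_id_fun', id]
  by_cases h2 : 2 < U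
  · rw [PySem.List.pyRange_one_cons h2, List.filter_cons]
    simp only [show (2:Int) + 1 = 3 by norm_num]
    have : isSpecial 2 factorialSeries = false := by decide
    rw [this]
    simp only [Bool.false_eq_true, if_false]
    by_cases hcap : U ≤ 2540161
    · have : min U 2540161 = U := by omega
      rw [this]
      exact List.filter_congr (fun n hn => by
        have := PySem.List.mem_pyRange_one.mp hn
        exact pred_eq n (by omega))
    · have : min U 2540161 = 2540161 := by omega
      rw [this, PySem.List.pyRange_one_append 3 2540161 U (by omega) (by omega),
        List.filter_append]
      have hnil : (PySem.List.pyRange 2540161 U 1).filter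
          (fun n => isSpecial n factorialSeries) = [] := by
        apply List.filter_eq_nil_iff.mpr
        intro n hn
        have hb := PySem.List.mem_pyRange_one.mp hn
        rw [pred_eq n (by omega), pred_false_big n (by omega)]
        simp
      rw [hnil, List.append_nil]
      exact List.filter_congr (fun n hn => by
        have := PySem.List.mem_pyRange_one.mp hn
        exact pred_eq n (by omega))
  · rw [PySem.List.pyRange_one_eq_nil (by omega), PySem.List.pyRange_one_eq_nil (by omega)]
    simp

-- ===== VERDICT (by name: the statement is the Claim_ definition above) =====
theorem digitsFactorials_spec : Claim_equal_digitsFactorials := by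
  intro U _
  show digitsFactorials U = digitsFactorials_alt U
  rw [digitsFactorials, digitsFactorials_alt]
  rw [lists_eq U]
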